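-- pv_equiv track=rewrite | github.com/Sanecek11/DD_PY_LABS | Лабораторная 4/Автомобиль. Количество маршрутов/task.py | car_paths
-- ===== SOURCE A (Python) =====
-- from typing import List
--
-- def car_paths(n: int, m: int) -> List[List[int]]:
--     """
--     Просчитать количество маршрутов до каждой клетки с учетом возможных перемещений.
--
--     :param n: Количество строк в таблице
--     :param m: Количество столбцов в таблице
--
--     :return: Новую таблицу с посчитанным количеством маршрутов в каждую клетку
--     """
--     pt = [[0] * m for _ in range(n)]
--     pt[0][0] = 1  # левый верхний угол
--
--     for i in range(n):
--         for j in range(m):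
--             if i > 0:
--                 pt[i][j] += pt[i-1][j]  # добавляем пути сверху
--             if j > 0:
--                 pt[i][j] += pt[i][j-1]  # добавляем пути слева
--             if i > 0 and j > 0:
--                 pt[i][j] += pt[i-1][j-1]  # добавляем диагональные пути
--     return pt
-- ===== SOURCE B (Python) =====
-- from math import comb
-- from typing import List
--
-- def car_paths(n: int, m: int) -> List[List[int]]:
--     """Delannoy closed form: each cell computed independently, no DP sweep."""
--     return [[sum(comb(i, k) * comb(j, k) * 2 ** k for k in range(min(i, j) + 1))
--              for j in range(m)]
--             for i in range(n)]
-- ===== Notes on version B (the rewrite author's own statement) =====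
-- stated objective: alternative
-- what changed: Replaced A's in-place neighbour-accumulation DP sweep over the grid with an independent per-cell Delannoy closed form sum(comb(i,k)*comb(j,k)*2**k for k in range(min(i,j)+1)) using math.comb.
import Mathlib
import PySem

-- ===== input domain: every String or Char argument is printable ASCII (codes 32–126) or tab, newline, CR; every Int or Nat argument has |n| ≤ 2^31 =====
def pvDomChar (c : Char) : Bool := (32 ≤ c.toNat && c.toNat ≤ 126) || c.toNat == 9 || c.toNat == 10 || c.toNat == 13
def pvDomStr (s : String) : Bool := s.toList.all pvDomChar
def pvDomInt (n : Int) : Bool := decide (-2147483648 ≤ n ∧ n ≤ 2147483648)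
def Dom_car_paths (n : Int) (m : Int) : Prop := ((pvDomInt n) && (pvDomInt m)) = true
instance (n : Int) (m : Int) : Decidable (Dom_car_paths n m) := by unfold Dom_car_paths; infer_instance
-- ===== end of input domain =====

-- B replaces A's neighbour-accumulation DP sweep by an independent per-cell Delannoy
-- closed form (sum of binomial products), a different algorithm of similar size (objective: alternative).

-- ===== PORT A =====
-- pt[i][j] read (always in range under Pre_)
def pvGet2 (pt : List (List Int)) (i j : Int) : Int :=
  PySem.List.pyGetD (PySem.List.pyGetD pt i []) j 0

-- pt[i][j] = v write (indices are nonneg loop counters here)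
def pvSet2 (pt : List (List Int)) (i j : Int) (v : Int) : List (List Int) :=
  pt.set i.toNat ((pt.getD i.toNat []).set j.toNat v)

def car_paths (n : Int) (m : Int) : List (List Int) :=
  let pt := (PySem.List.pyRange 0 n 1).map (fun _ => List.replicate m.toNat (0 : Int))
  let pt := pvSet2 pt 0 0 1
  (PySem.List.pyRange 0 n 1).foldl (fun pt i =>
    (PySem.List.pyRange 0 m 1).foldl (fun pt j =>
      let pt := if 0 < i then pvSet2 pt i j (pvGet2 pt i j + pvGet2 pt (i-1) j) else pt
      let pt := if 0 < j then pvSet2 pt i j (pvGet2 pt i j + pvGet2 pt i (j-1)) else pt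
      if 0 < i ∧ 0 < j then pvSet2 pt i j (pvGet2 pt i j + pvGet2 pt (i-1) (j-1)) else pt
    ) pt) pt

-- ===== PORT B =====
-- sum(comb(i,k)*comb(j,k)*2**k for k in range(min(i,j)+1))
def pvCell (i j : Int) : Int :=
  ((PySem.List.pyRange 0 (min i j + 1) 1).map
    (fun k => ((Nat.choose i.toNat k.toNat * Nat.choose j.toNat k.toNat : Nat) : Int) * 2 ^ k.toNat)).sum

def car_paths_alt (n : Int) (m : Int) : List (List Int) :=
  (PySem.List.pyRange 0 n 1).map (fun i =>
    (PySem.List.pyRange 0 m 1).map (fun j => pvCell i j))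

-- ===== PRECONDITION & SPEC =====
-- Pre_ excludes exactly the inputs where A raises IndexError (empty grid: n < 1 or m < 1).
def Pre_car_paths (n : Int) (m : Int) : Prop := 1 ≤ n ∧ 1 ≤ m
instance (n : Int) (m : Int) : Decidable (Pre_car_paths n m) := by unfold Pre_car_paths; infer_instance
def pvWitness_car_paths : Int × Int := (2, 3)

def Spec_car_paths (n : Int) (m : Int) (out : List (List Int)) : Prop := out = car_paths_alt n m
instance (n : Int) (m : Int) (out : List (List Int)) : Decidable (Spec_car_paths n m out) := by unfold Spec_car_paths; infer_instance

-- ===== CLAIM (what is proved, stated in full; the proofs are below) =====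
def Claim_equal_car_paths : Prop := ∀ (n : Int) (m : Int), Dom_car_paths n m → Pre_car_paths n m → Spec_car_paths n m (car_paths n m)
-- ===== LEMMAS AND PROOFS =====

-- the Delannoy partial sums, over a flexible summation bound s
def pvT (s i j : Nat) : Nat := ∑ k ∈ Finset.range s, i.choose k * j.choose k * 2 ^ k
def pvU (s i j : Nat) : Nat := ∑ k ∈ Finset.range s, i.choose (k+1) * j.choose k * 2 ^ (k+1)
def pvDel (i j : Nat) : Nat := pvT (min i j + 1) i j

lemma pvT_symm (s i j : Nat) : pvT s i j = pvT s j i := by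
  unfold pvT; exact Finset.sum_congr rfl (fun k _ => by ring)

lemma pvT_stab (s i j : Nat) (h : i < s ∨ j < s) : pvT (s+1) i j = pvT s i j := by
  unfold pvT
  rw [Finset.sum_range_succ]
  rcases h with h | h
  · rw [Nat.choose_eq_zero_of_lt h]; ring
  · rw [Nat.choose_eq_zero_of_lt h]; ring

lemma pvT_eq_del (s i j : Nat) (h : min i j < s) : pvT s i j = pvDel i j := by
  induction s with
  | zero => omega
  | succ s ih =>
    rcases Nat.lt_or_ge (min i j) s with h' | h'
    · rw [pvT_stab s i j (by omega), ih h']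
    · have : s = min i j := by omega
      subst this; rfl

lemma pvT_right (s i j : Nat) : pvT (s+1) i (j+1) = pvT (s+1) i j + pvU s i j := by
  unfold pvT pvU
  rw [Finset.sum_range_succ' _ s, Finset.sum_range_succ' _ s]
  simp only [Nat.choose_succ_succ, Nat.succ_eq_add_one, Nat.choose_zero_right, pow_zero]
  have h : (∑ x ∈ Finset.range s, i.choose (x+1) * (j.choose x + j.choose (x+1)) * 2 ^ (x+1))
      = (∑ x ∈ Finset.range s, i.choose (x+1) * j.choose (x+1) * 2 ^ (x+1))
      + (∑ x ∈ Finset.range s, i.choose (x+1) * j.choose x * 2 ^ (x+1)) := by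
    rw [← Finset.sum_add_distrib]
    exact Finset.sum_congr rfl (fun k _ => by ring)
  omega

lemma pvT_left (s i j : Nat) : pvT (s+1) (i+1) j = pvT (s+1) i j + pvU s j i := by
  rw [pvT_symm, pvT_right, pvT_symm]

lemma pvT_diag (s i j : Nat) :
    pvT (s+1) (i+1) (j+1) = pvT (s+1) i j + pvU s i j + pvU s j i + 2 * pvT s i j := by
  unfold pvT pvU
  rw [Finset.sum_range_succ' _ s, Finset.sum_range_succ' _ s, Finset.mul_sum]
  simp only [Nat.choose_succ_succ, Nat.succ_eq_add_one, Nat.choose_zero_right, pow_zero]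
  have h : (∑ x ∈ Finset.range s, (i.choose x + i.choose (x+1)) * (j.choose x + j.choose (x+1)) * 2 ^ (x+1))
      = (∑ x ∈ Finset.range s, i.choose (x+1) * j.choose (x+1) * 2 ^ (x+1))
      + (∑ x ∈ Finset.range s, i.choose (x+1) * j.choose x * 2 ^ (x+1))
      + (∑ x ∈ Finset.range s, j.choose (x+1) * i.choose x * 2 ^ (x+1))
      + (∑ x ∈ Finset.range s, 2 * (i.choose x * j.choose x * 2 ^ x)) := by
    rw [← Finset.sum_add_distrib, ← Finset.sum_add_distrib, ← Finset.sum_add_distrib]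
    exact Finset.sum_congr rfl (fun k _ => by ring)
  omega

lemma pvDel_rec (i j : Nat) :
    pvDel (i+1) (j+1) = pvDel i (j+1) + pvDel (i+1) j + pvDel i j := by
  set s := i + j + 1 with hs
  have h1 : pvDel (i+1) (j+1) = pvT (s+1) (i+1) (j+1) := (pvT_eq_del _ _ _ (by omega)).symm
  have h2 : pvDel i (j+1) = pvT (s+1) i (j+1) := (pvT_eq_del _ _ _ (by omega)).symm
  have h3 : pvDel (i+1) j = pvT (s+1) (i+1) j := (pvT_eq_del _ _ _ (by omega)).symm
  have h4 : pvDel i j = pvT s i j := (pvT_eq_del _ _ _ (by omega)).symm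
  have h5 : pvT (s+1) i j = pvT s i j := pvT_stab s i j (by omega)
  rw [h1, h2, h3, h4, pvT_diag, pvT_right, pvT_left, h5]
  ring

lemma pvDel_zero_left (j : Nat) : pvDel 0 j = 1 := by
  simp [pvDel, pvT]

lemma pvDel_zero_right (i : Nat) : pvDel i 0 = 1 := by
  simp [pvDel, pvT]

-- grids as functions of the two indices
def pvGrid (N M : Nat) (f : Nat → Nat → Int) : List (List Int) :=
  (List.range N).map (fun i => (List.range M).map (f i))

-- intended value of cell (i,j) after the sweep has fully processed rows < r and,
-- in row r, columns < c
def pvV (r c i j : Nat) : Int :=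
  if i < r ∨ (i = r ∧ j < c) then (pvDel i j : Int) else (if i = 0 ∧ j = 0 then 1 else 0)

lemma pvV_mono_eq (r c r' c' i j : Nat)
    (h : (i < r ∨ (i = r ∧ j < c)) ↔ (i < r' ∨ (i = r' ∧ j < c'))) :
    pvV r c i j = pvV r' c' i j := by
  unfold pvV
  by_cases hh : i < r ∨ (i = r ∧ j < c)
  · rw [if_pos hh, if_pos (h.mp hh)]
  · rw [if_neg hh, if_neg (fun x => hh (h.mpr x))]

lemma pvGrid_congr {N M : Nat} {f g : Nat → Nat → Int}
    (h : ∀ i, i < N → ∀ j, j < M → f i j = g i j) : pvGrid N M f = pvGrid N M g := by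
  unfold pvGrid
  apply List.map_congr_left
  intro i hi
  apply List.map_congr_left
  intro j hj
  exact h i (List.mem_range.mp hi) j (List.mem_range.mp hj)

lemma set_map_range {α : Type} (f : Nat → α) (N i : Nat) (v : α) (_h : i < N) :
    ((List.range N).map f).set i v = (List.range N).map (fun k => if k = i then v else f k) := by
  apply List.ext_getElem
  · simp
  · intro k h1 h2
    simp only [List.getElem_set, List.getElem_map, List.getElem_range]
    split_ifs with hik hki hki
    · rfl
    · omega
    · omega
    · rfl

lemma pvGet2_grid {N M : Nat} (f : Nat → Nat → Int) (i j : Nat) (hi : i < N) (hj : j < M) :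
    pvGet2 (pvGrid N M f) (i : Int) (j : Int) = f i j := by
  unfold pvGet2 pvGrid
  rw [PySem.List.pyGetD_natCast, PySem.List.pyGetD_natCast]
  rw [List.getD_eq_getElem?_getD]
  simp [hi, hj, List.getD_eq_getElem?_getD]

lemma pvSet2_grid {N M : Nat} (f : Nat → Nat → Int) (r c : Nat) (v : Int)
    (hr : r < N) (hc : c < M) :
    pvSet2 (pvGrid N M f) (r : Int) (c : Int) v
      = pvGrid N M (fun i j => if i = r ∧ j = c then v else f i j) := by
  unfold pvSet2 pvGrid
  simp only [Int.toNat_natCast]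
  have hrow : ((List.range N).map (fun i => (List.range M).map (f i))).getD r []
      = (List.range M).map (f r) := by
    rw [List.getD_eq_getElem?_getD]; simp [hr]
  rw [hrow, set_map_range _ M c v hc, set_map_range _ N r _ hr]
  apply List.map_congr_left
  intro i hi
  by_cases hir : i = r
  · subst hir
    simp only [if_true]
    apply List.map_congr_left
    intro j hj
    by_cases hjc : j = c <;> simp [hjc]
  · simp only [if_neg hir]
    apply List.map_congr_left
    intro j hj
    simp [hir]

-- generic foldl-over-range invariant
lemma foldl_range_inv {α : Type} (f : α → Nat → α) (P : Nat → α → Prop) (K : Nat) (a : α)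
    (h0 : P 0 a) (hs : ∀ k b, k < K → P k b → P (k+1) (f b k)) :
    P K ((List.range K).foldl f a) := by
  induction K with
  | zero => simpa using h0
  | succ K ih =>
    rw [List.range_succ, List.foldl_append]
    exact hs K _ (by omega) (ih (fun k b hk => hs k b (by omega)))

-- foldl over (pyRange 0 N 1) = foldl over Nat range with cast
lemma foldl_pyRange_nat {α : Type} (g : α → Int → α) (N : Nat) (a : α) :
    (PySem.List.pyRange 0 (N : Int) 1).foldl g a
      = (List.range N).foldl (fun b (k : Nat) => g b (k : Int)) a := by
  rw [PySem.List.pyRange_zero_nat N]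
  exact List.foldl_map (f := fun k : Nat => (k : Int)) (g := g) (l := List.range N) (init := a)

-- the inner-loop body of A, named
def pvBody (pt : List (List Int)) (i j : Int) : List (List Int) :=
  let pt := if 0 < i then pvSet2 pt i j (pvGet2 pt i j + pvGet2 pt (i-1) j) else pt
  let pt := if 0 < j then pvSet2 pt i j (pvGet2 pt i j + pvGet2 pt i (j-1)) else pt
  if 0 < i ∧ 0 < j then pvSet2 pt i j (pvGet2 pt i j + pvGet2 pt (i-1) (j-1)) else pt

lemma pvV_next {N M : Nat} (r c : Nat) (hr : r < N) (hc : c < M) :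
    pvBody (pvGrid N M (pvV r c)) (r : Int) (c : Int) = pvGrid N M (pvV r (c+1)) := by
  unfold pvBody
  cases r with
  | zero =>
    cases c with
    | zero =>
      simp only [Nat.cast_zero, lt_self_iff_false, if_false, false_and]
      apply pvGrid_congr
      intro i hi j hj
      by_cases h : i = 0 ∧ j = 0
      · obtain ⟨h1, h2⟩ := h; subst h1; subst h2
        simp [pvV, pvDel_zero_left]
      · exact pvV_mono_eq 0 0 0 1 i j (by omega)
    | succ c =>
      have g1 := pvGet2_grid (N := N) (M := M) (pvV 0 (c+1)) 0 (c+1) (by omega) hc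
      have g2 := pvGet2_grid (N := N) (M := M) (pvV 0 (c+1)) 0 c (by omega) (by omega)
      have s1 := pvSet2_grid (N := N) (M := M) (pvV 0 (c+1)) 0 (c+1)
        (pvV 0 (c+1) 0 (c+1) + pvV 0 (c+1) 0 c) (by omega) hc
      simp only [Nat.cast_zero] at g1 g2 s1
      have hc' : (0 : Int) < ((c + 1 : Nat) : Int) := by positivity
      have hcast : ((c + 1 : Nat) : Int) - 1 = ((c : Nat) : Int) := by push_cast; ring
      simp only [Nat.cast_zero, lt_self_iff_false, if_false, false_and, if_pos hc', hcast]
      rw [g1, g2, s1]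
      apply pvGrid_congr
      intro i hi j hj
      by_cases h : i = 0 ∧ j = c + 1
      · obtain ⟨h1, h2⟩ := h; subst h1; subst h2
        have hcond : (0 : Nat) = 0 ∧ c + 1 = c + 1 := ⟨rfl, rfl⟩
        rw [if_pos hcond]
        have e1 : pvV 0 (c+1) 0 (c+1) = 0 := by
          unfold pvV; rw [if_neg (by omega), if_neg (by omega)]
        have e2 : pvV 0 (c+1) 0 c = (pvDel 0 c : Int) := by
          unfold pvV; rw [if_pos (by omega)]
        have e3 : pvV 0 (c+2) 0 (c+1) = (pvDel 0 (c+1) : Int) := by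
          unfold pvV; rw [if_pos (by omega)]
        rw [e1, e2, e3, pvDel_zero_left, pvDel_zero_left]
        ring
      · rw [if_neg h]
        exact pvV_mono_eq 0 (c+1) 0 (c+2) i j (by omega)
  | succ r =>
    have hr' : (0 : Int) < ((r + 1 : Nat) : Int) := by positivity
    have hrc : ((r + 1 : Nat) : Int) - 1 = ((r : Nat) : Int) := by push_cast; ring
    cases c with
    | zero =>
      have g1 := pvGet2_grid (N := N) (M := M) (pvV (r+1) 0) (r+1) 0 hr (by omega)
      have g2 := pvGet2_grid (N := N) (M := M) (pvV (r+1) 0) r 0 (by omega) (by omega)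
      have s1 := pvSet2_grid (N := N) (M := M) (pvV (r+1) 0) (r+1) 0
        (pvV (r+1) 0 (r+1) 0 + pvV (r+1) 0 r 0) hr (by omega)
      simp only [Nat.cast_zero] at g1 g2 s1
      simp only [Nat.cast_zero, lt_self_iff_false, if_false, and_false, if_pos hr', hrc]
      rw [g1, g2, s1]
      apply pvGrid_congr
      intro i hi j hj
      by_cases h : i = r + 1 ∧ j = 0
      · obtain ⟨h1, h2⟩ := h; subst h1; subst h2
        have hcond : r + 1 = r + 1 ∧ (0 : Nat) = 0 := ⟨rfl, rfl⟩
        rw [if_pos hcond]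
        have e1 : pvV (r+1) 0 (r+1) 0 = 0 := by
          unfold pvV; rw [if_neg (by omega), if_neg (by omega)]
        have e2 : pvV (r+1) 0 r 0 = (pvDel r 0 : Int) := by
          unfold pvV; rw [if_pos (by omega)]
        have e3 : pvV (r+1) 1 (r+1) 0 = (pvDel (r+1) 0 : Int) := by
          unfold pvV; rw [if_pos (by omega)]
        rw [e1, e2, e3, pvDel_zero_right, pvDel_zero_right]
        ring
      · rw [if_neg h]
        exact pvV_mono_eq (r+1) 0 (r+1) 1 i j (by omega)
    | succ c =>
      have hc' : (0 : Int) < ((c + 1 : Nat) : Int) := by positivity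
      have hcc : ((c + 1 : Nat) : Int) - 1 = ((c : Nat) : Int) := by push_cast; ring
      simp only [if_pos hr', if_pos hc', if_pos (And.intro hr' hc'), hrc, hcc]
      rw [pvGet2_grid (N := N) (M := M) (pvV (r+1) (c+1)) (r+1) (c+1) hr hc,
          pvGet2_grid (N := N) (M := M) (pvV (r+1) (c+1)) r (c+1) (by omega) hc,
          pvSet2_grid (N := N) (M := M) (pvV (r+1) (c+1)) (r+1) (c+1) _ hr hc]
      set f1 : Nat → Nat → Int := fun i j => if i = r + 1 ∧ j = c + 1
          then (pvV (r+1) (c+1) (r+1) (c+1) + pvV (r+1) (c+1) r (c+1)) else pvV (r+1) (c+1) i j with hf1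
      rw [pvGet2_grid (N := N) (M := M) f1 (r+1) (c+1) hr hc,
          pvGet2_grid (N := N) (M := M) f1 (r+1) c hr (by omega),
          pvSet2_grid (N := N) (M := M) f1 (r+1) (c+1) _ hr hc]
      set f2 : Nat → Nat → Int := fun i j => if i = r + 1 ∧ j = c + 1
          then (f1 (r+1) (c+1) + f1 (r+1) c) else f1 i j with hf2
      rw [pvGet2_grid (N := N) (M := M) f2 (r+1) (c+1) hr hc,
          pvGet2_grid (N := N) (M := M) f2 r c (by omega) (by omega),
          pvSet2_grid (N := N) (M := M) f2 (r+1) (c+1) _ hr hc]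
      apply pvGrid_congr
      intro i hi j hj
      by_cases h : i = r + 1 ∧ j = c + 1
      · obtain ⟨h1, h2⟩ := h; subst h1; subst h2
        have hcond : r + 1 = r + 1 ∧ c + 1 = c + 1 := ⟨rfl, rfl⟩
        have hne : ¬ (r + 1 = r + 1 ∧ c = c + 1) := by omega
        have hne2 : ¬ (r = r + 1 ∧ c = c + 1) := by omega
        have e0 : pvV (r+1) (c+1) (r+1) (c+1) = 0 := by
          unfold pvV; rw [if_neg (by omega), if_neg (by omega)]
        have e1 : pvV (r+1) (c+1) r (c+1) = (pvDel r (c+1) : Int) := by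
          unfold pvV; rw [if_pos (by omega)]
        have e2 : pvV (r+1) (c+1) (r+1) c = (pvDel (r+1) c : Int) := by
          unfold pvV; rw [if_pos (by omega)]
        have e3 : pvV (r+1) (c+1) r c = (pvDel r c : Int) := by
          unfold pvV; rw [if_pos (by omega)]
        have e4 : pvV (r+1) (c+2) (r+1) (c+1) = (pvDel (r+1) (c+1) : Int) := by
          unfold pvV; rw [if_pos (by omega)]
        have hf1a : f1 (r+1) (c+1) = (pvDel r (c+1) : Int) := by
          rw [hf1]; beta_reduce
          rw [if_pos hcond, e0, e1]; ring
        have hf1b : f1 (r+1) c = (pvDel (r+1) c : Int) := by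
          rw [hf1]; beta_reduce
          rw [if_neg hne]; exact e2
        have hf2a : f2 (r+1) (c+1) = (pvDel r (c+1) : Int) + (pvDel (r+1) c : Int) := by
          rw [hf2]; beta_reduce
          rw [if_pos hcond, hf1a, hf1b]
        have hf2b : f2 r c = (pvDel r c : Int) := by
          rw [hf2]; beta_reduce
          rw [if_neg hne2, hf1]; beta_reduce
          rw [if_neg hne2]; exact e3
        rw [if_pos hcond, hf2a, hf2b, e4, pvDel_rec]
        push_cast; ring
      · rw [if_neg h]
        rw [hf2]; beta_reduce
        rw [if_neg h, hf1]; beta_reduce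
        rw [if_neg h]
        exact pvV_mono_eq (r+1) (c+1) (r+1) (c+2) i j (by omega)

lemma pvV_row_wrap {N M : Nat} (r : Nat) :
    pvGrid N M (pvV r M) = pvGrid N M (pvV (r+1) 0) := by
  apply pvGrid_congr
  intro i hi j hj
  exact pvV_mono_eq r M (r+1) 0 i j (by omega)

lemma inner_loop (N M r : Nat) (hr : r < N) :
    (List.range M).foldl (fun pt (j : Nat) => pvBody pt (r : Int) (j : Int)) (pvGrid N M (pvV r 0))
      = pvGrid N M (pvV (r+1) 0) := by
  rw [← pvV_row_wrap r]
  exact foldl_range_inv _ (fun c pt => pt = pvGrid N M (pvV r c)) M _ rfl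
    (fun c pt hc hpt => by rw [hpt]; exact pvV_next r c hr hc)

lemma outer_loop (N M : Nat) :
    (List.range N).foldl
        (fun pt (i : Nat) => (List.range M).foldl (fun pt (j : Nat) => pvBody pt (i : Int) (j : Int)) pt)
        (pvGrid N M (pvV 0 0))
      = pvGrid N M (pvV N 0) := by
  exact foldl_range_inv _ (fun r pt => pt = pvGrid N M (pvV r 0)) N _ rfl
    (fun r pt hrn hpt => by rw [hpt]; exact inner_loop N M r hrn)


-- the seeded initial grid is pvGrid N M (pvV 0 0)
lemma init_grid (N M : Nat) (hN : 1 ≤ N) (hM : 1 ≤ M) :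
    pvSet2 ((PySem.List.pyRange 0 (N : Int) 1).map (fun _ => List.replicate M (0 : Int))) 0 0 1
      = pvGrid N M (pvV 0 0) := by
  have h1 : (PySem.List.pyRange 0 (N : Int) 1).map (fun _ => List.replicate M (0 : Int))
      = pvGrid N M (fun _ _ => 0) := by
    rw [PySem.List.pyRange_zero_nat N, List.map_map]
    unfold pvGrid
    apply List.map_congr_left
    intro i _
    simp only [Function.comp]
    rw [List.map_const', List.length_range]
  have s1 := pvSet2_grid (N := N) (M := M) (fun _ _ => 0) 0 0 1 hN hM
  simp only [Nat.cast_zero] at s1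
  rw [h1, s1]
  apply pvGrid_congr
  intro i hi j hj
  unfold pvV
  rw [if_neg (show ¬ (i < 0 ∨ (i = 0 ∧ j < 0)) by omega)]

-- the list-range sum equals the Finset sum
lemma list_sum_range (s : Nat) (g : Nat → Int) :
    ((List.range s).map g).sum = ∑ k ∈ Finset.range s, g k := by
  induction s with
  | zero => simp
  | succ s ih => rw [List.range_succ, Finset.sum_range_succ, List.map_append, List.sum_append, ih]; simp

-- B's cell is the Delannoy number
lemma pvCell_eq_del (i j : Nat) : pvCell (i : Int) (j : Int) = (pvDel i j : Int) := by
  unfold pvCell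
  have hmin : (min (i : Int) (j : Int)) + 1 = ((min i j + 1 : Nat) : Int) := by
    push_cast; omega
  rw [hmin, PySem.List.pyRange_zero_nat (min i j + 1), List.map_map]
  have hfun : ((fun k : Int => ((Nat.choose (i : Int).toNat k.toNat * Nat.choose (j : Int).toNat k.toNat : Nat) : Int) * 2 ^ k.toNat) ∘ fun k : Nat => (k : Int))
      = fun k : Nat => ((i.choose k * j.choose k * 2 ^ k : Nat) : Int) := by
    funext k
    simp only [Function.comp, Int.toNat_natCast]
    push_cast
    ring
  rw [hfun, list_sum_range]
  unfold pvDel pvT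
  push_cast
  rfl

-- B's port is the Delannoy grid
lemma alt_eq_grid (N M : Nat) :
    car_paths_alt (N : Int) (M : Int) = pvGrid N M (fun i j => (pvDel i j : Int)) := by
  unfold car_paths_alt pvGrid
  rw [PySem.List.pyRange_zero_nat N, PySem.List.pyRange_zero_nat M, List.map_map]
  apply List.map_congr_left
  intro i _
  simp only [Function.comp]
  rw [List.map_map]
  apply List.map_congr_left
  intro j _
  simp only [Function.comp]
  exact pvCell_eq_del i j

-- ===== VERDICT (by name: the statement is the Claim_ definition above) =====
theorem car_paths_spec : Claim_equal_car_paths := by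
  intro n m _ hpre
  obtain ⟨hn, hm⟩ := hpre
  obtain ⟨N, rfl⟩ := Int.eq_ofNat_of_zero_le (by omega : (0:Int) ≤ n)
  obtain ⟨M, rfl⟩ := Int.eq_ofNat_of_zero_le (by omega : (0:Int) ≤ m)
  have hN : 1 ≤ N := by exact_mod_cast hn
  have hM : 1 ≤ M := by exact_mod_cast hm
  unfold Spec_car_paths car_paths
  rw [alt_eq_grid N M]
  show (PySem.List.pyRange 0 ((N : Nat) : Int) 1).foldl
      (fun pt i => (PySem.List.pyRange 0 ((M : Nat) : Int) 1).foldl (fun pt j => pvBody pt i j) pt)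
      (pvSet2 ((PySem.List.pyRange 0 ((N : Nat) : Int) 1).map (fun _ => List.replicate ((M : Nat) : Int).toNat (0 : Int))) 0 0 1)
    = pvGrid N M (fun i j => (pvDel i j : Int))
  rw [show ((M : Nat) : Int).toNat = M from Int.toNat_natCast M]
  rw [init_grid N M hN hM, foldl_pyRange_nat]
  have hstep : (fun (pt : List (List Int)) (k : Nat) =>
        (PySem.List.pyRange 0 ((M : Nat) : Int) 1).foldl (fun pt j => pvBody pt (k : Int) j) pt)
      = (fun (pt : List (List Int)) (k : Nat) =>
        (List.range M).foldl (fun pt (j : Nat) => pvBody pt (k : Int) (j : Int)) pt) :=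
    funext fun pt => funext fun k => foldl_pyRange_nat (fun pt j => pvBody pt (k : Int) j) M pt
  rw [hstep, outer_loop N M]
  exact pvGrid_congr (fun i hi j hj => by unfold pvV; rw [if_pos (Or.inl hi)])
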